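-- pv_equiv track=rewrite | github.com/guerda/beets-statistics | beetsstatistics.py | map_file_format_to_lossy
-- ===== SOURCE A (Python) =====
-- LOSSY_FORMATS = ["mp3", "aac", "ogg"]
--
-- LOSSLESS_FORMATS = ["flac", "wav"]
--
-- def map_file_format_to_lossy(formats):
--     lossy = 0
--     lossless = 0
--     unknown = 0
--     for file in formats:
--         if file[0].lower() in LOSSLESS_FORMATS:
--             lossless += file[1]
--         elif file[0].lower() in LOSSY_FORMATS:
--             lossy += file[1]
--         else:
--             unknown += file[1]
--     return lossless, lossy, unknown
-- ===== SOURCE B (Python) =====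
-- LOSSY_FORMATS = ["mp3", "aac", "ogg"]
--
-- LOSSLESS_FORMATS = ["flac", "wav"]
--
-- def map_file_format_to_lossy(formats):
--     # Staged passes: sum everything, sum each known category separately,
--     # and derive 'unknown' arithmetically (the two format lists are disjoint,
--     # so the categories partition the total).
--     total = sum(v for _, v in formats)
--     lossless = sum(v for f, v in formats if f.lower() in LOSSLESS_FORMATS)
--     lossy = sum(v for f, v in formats if f.lower() in LOSSY_FORMATS)
--     return lossless, lossy, total - lossless - lossy
-- ===== Notes on version B (the rewrite author's own statement) =====
-- stated objective: alternative
-- what changed: Replaces the single-pass if/elif/else accumulator loop with three independent filtered sums over the list, and computes the 'unknown' bucket arithmetically as total - lossless - lossy instead of via a branch (correct because the lossy and lossless format lists are disjoint).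
import Mathlib
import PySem

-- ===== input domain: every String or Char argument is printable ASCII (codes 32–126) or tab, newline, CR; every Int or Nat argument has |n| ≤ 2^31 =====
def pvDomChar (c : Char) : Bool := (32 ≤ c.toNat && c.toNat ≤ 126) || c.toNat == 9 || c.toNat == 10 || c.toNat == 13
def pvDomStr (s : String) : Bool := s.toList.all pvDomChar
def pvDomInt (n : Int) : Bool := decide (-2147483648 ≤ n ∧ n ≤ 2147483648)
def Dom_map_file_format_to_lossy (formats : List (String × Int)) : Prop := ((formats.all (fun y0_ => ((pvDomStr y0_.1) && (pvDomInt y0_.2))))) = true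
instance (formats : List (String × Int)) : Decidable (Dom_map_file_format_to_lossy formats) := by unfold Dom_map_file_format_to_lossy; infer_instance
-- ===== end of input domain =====

-- B replaces the single-pass branching accumulator with three staged filtered sums, deriving 'unknown' as total - lossless - lossy (alternative decomposition; same O(n) cost).

-- ===== PORT A =====
def LOSSY_FORMATS : List String := ["mp3", "aac", "ogg"]
def LOSSLESS_FORMATS : List String := ["flac", "wav"]

def map_file_format_to_lossy (formats : List (String × Int)) : Int × Int × Int :=
  -- state (lossy, lossless, unknown) in Python's variable order
  let s := formats.foldl
    (fun (st : Int × Int × Int) file =>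
      if LOSSLESS_FORMATS.contains (PySem.Str.lower file.1) then
        (st.1, st.2.1 + file.2, st.2.2)
      else if LOSSY_FORMATS.contains (PySem.Str.lower file.1) then
        (st.1 + file.2, st.2.1, st.2.2)
      else
        (st.1, st.2.1, st.2.2 + file.2))
    (0, 0, 0)
  (s.2.1, s.1, s.2.2)

-- ===== PORT B =====
def map_file_format_to_lossy_alt (formats : List (String × Int)) : Int × Int × Int :=
  let total := (formats.map (·.2)).sum
  let lossless := ((formats.filter (fun f => LOSSLESS_FORMATS.contains (PySem.Str.lower f.1))).map (·.2)).sum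
  let lossy := ((formats.filter (fun f => LOSSY_FORMATS.contains (PySem.Str.lower f.1))).map (·.2)).sum
  (lossless, lossy, total - lossless - lossy)

-- ===== PRECONDITION & SPEC =====
def Spec_map_file_format_to_lossy (formats : List (String × Int)) (out : Int × Int × Int) : Prop := out = map_file_format_to_lossy_alt formats
instance (formats : List (String × Int)) (out : Int × Int × Int) : Decidable (Spec_map_file_format_to_lossy formats out) := by unfold Spec_map_file_format_to_lossy; infer_instance

-- ===== CLAIM (what is proved, stated in full; the proofs are below) =====
def Claim_equal_map_file_format_to_lossy : Prop := ∀ (formats : List (String × Int)), Dom_map_file_format_to_lossy formats → Spec_map_file_format_to_lossy formats (map_file_format_to_lossy formats)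

-- ===== LEMMAS AND PROOFS =====

-- the two format lists are disjoint: a string in LOSSLESS_FORMATS is not in LOSSY_FORMATS
lemma disjoint_formats (t : String) (h : LOSSLESS_FORMATS.contains t = true) :
    LOSSY_FORMATS.contains t = false := by
  simp only [LOSSLESS_FORMATS, List.contains_eq_mem, List.mem_cons, List.not_mem_nil,
    or_false, decide_eq_true_eq] at h
  rcases h with h | h <;> subst h <;> decide

-- A's fold, characterised by B's three sums
lemma foldA (l : List (String × Int)) (a b c : Int) :
    l.foldl
      (fun (st : Int × Int × Int) file =>
        if LOSSLESS_FORMATS.contains (PySem.Str.lower file.1) then (st.1, st.2.1 + file.2, st.2.2)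
        else if LOSSY_FORMATS.contains (PySem.Str.lower file.1) then (st.1 + file.2, st.2.1, st.2.2)
        else (st.1, st.2.1, st.2.2 + file.2)) (a, b, c)
    = (a + ((l.filter (fun f => LOSSY_FORMATS.contains (PySem.Str.lower f.1))).map (·.2)).sum,
       b + ((l.filter (fun f => LOSSLESS_FORMATS.contains (PySem.Str.lower f.1))).map (·.2)).sum,
       c + ((l.map (·.2)).sum
            - ((l.filter (fun f => LOSSLESS_FORMATS.contains (PySem.Str.lower f.1))).map (·.2)).sum
            - ((l.filter (fun f => LOSSY_FORMATS.contains (PySem.Str.lower f.1))).map (·.2)).sum)) := by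
  induction l generalizing a b c with
  | nil => simp
  | cons f rest ih =>
    obtain ⟨s, v⟩ := f
    by_cases h1 : LOSSLESS_FORMATS.contains (PySem.Str.lower s)
    · have h2 : LOSSY_FORMATS.contains (PySem.Str.lower s) = false := disjoint_formats _ h1
      simp only [List.foldl_cons, h1, h2, Bool.false_eq_true, reduceIte]
      rw [ih]
      simp only [List.filter_cons, h1, h2, Bool.false_eq_true, reduceIte, List.map_cons,
        List.sum_cons, Prod.mk.injEq]
      refine ⟨?_, ?_, ?_⟩ <;> first | trivial | ring
    · have h1' : LOSSLESS_FORMATS.contains (PySem.Str.lower s) = false := by simpa using h1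
      by_cases h2 : LOSSY_FORMATS.contains (PySem.Str.lower s)
      · simp only [List.foldl_cons, h1', h2, Bool.false_eq_true, reduceIte]
        rw [ih]
        simp only [List.filter_cons, h1', h2, Bool.false_eq_true, reduceIte, List.map_cons,
          List.sum_cons, Prod.mk.injEq]
        refine ⟨?_, ?_, ?_⟩ <;> first | trivial | ring
      · have h2' : LOSSY_FORMATS.contains (PySem.Str.lower s) = false := by simpa using h2
        simp only [List.foldl_cons, h1', h2', Bool.false_eq_true, reduceIte]
        rw [ih]
        simp only [List.filter_cons, h1', h2', Bool.false_eq_true, reduceIte, List.map_cons,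
          List.sum_cons, Prod.mk.injEq]
        refine ⟨?_, ?_, ?_⟩ <;> first | trivial | ring

-- ===== VERDICT (by name: the statement is the Claim_ definition above) =====
theorem map_file_format_to_lossy_spec : Claim_equal_map_file_format_to_lossy := by
  intro formats _
  unfold Spec_map_file_format_to_lossy map_file_format_to_lossy map_file_format_to_lossy_alt
  simp only [foldA]
  norm_num
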